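-- pv_equiv track=rewrite | github.com/rajaboys/EDIErrorDoctor | edi_parser.py | summarize_edi
-- ===== SOURCE A (Python) =====
-- def summarize_edi(segments: list[dict], transaction_type: str) -> str:
--     """Generate a human-readable summary for display."""
--     counts = {}
--     for seg in segments:
--         counts[seg["id"]] = counts.get(seg["id"], 0) + 1
--
--     clm_count = counts.get("CLM", 0)
--     nm1_count = counts.get("NM1", 0)
--     total = len(segments)
--
--     return (
--         f"**Transaction Type:** {transaction_type}\n"
--         f"**Total Segments:** {total}\n"
--         f"**Claim Loops (CLM):** {clm_count}\n"
--         f"**Name Segments (NM1):** {nm1_count}\n"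
--         f"**Unique Segment Types:** {len(counts)}"
--     )
-- ===== SOURCE B (Python) =====
-- def summarize_edi(segments: list[dict], transaction_type: str) -> str:
--     """Generate a human-readable summary for display."""
--     ids = sorted(seg["id"] for seg in segments)
--     prev = None
--     unique = clm_count = nm1_count = 0
--     for x in ids:
--         if x != prev:
--             unique += 1
--         if x == "CLM":
--             clm_count += 1
--         elif x == "NM1":
--             nm1_count += 1
--         prev = x
--     return (
--         f"**Transaction Type:** {transaction_type}\n"
--         f"**Total Segments:** {len(segments)}\n"
--         f"**Claim Loops (CLM):** {clm_count}\n"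
--         f"**Name Segments (NM1):** {nm1_count}\n"
--         f"**Unique Segment Types:** {unique}"
--     )
-- ===== Notes on version B (the rewrite author's own statement) =====
-- stated objective: alternative
-- what changed: Replaces A's hash-map frequency counting with sort-then-scan: sort the ids, then one linear scan counting CLM/NM1 hits and adjacent-difference boundaries for the unique-type count, so no dictionary is ever built.
import Mathlib
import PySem

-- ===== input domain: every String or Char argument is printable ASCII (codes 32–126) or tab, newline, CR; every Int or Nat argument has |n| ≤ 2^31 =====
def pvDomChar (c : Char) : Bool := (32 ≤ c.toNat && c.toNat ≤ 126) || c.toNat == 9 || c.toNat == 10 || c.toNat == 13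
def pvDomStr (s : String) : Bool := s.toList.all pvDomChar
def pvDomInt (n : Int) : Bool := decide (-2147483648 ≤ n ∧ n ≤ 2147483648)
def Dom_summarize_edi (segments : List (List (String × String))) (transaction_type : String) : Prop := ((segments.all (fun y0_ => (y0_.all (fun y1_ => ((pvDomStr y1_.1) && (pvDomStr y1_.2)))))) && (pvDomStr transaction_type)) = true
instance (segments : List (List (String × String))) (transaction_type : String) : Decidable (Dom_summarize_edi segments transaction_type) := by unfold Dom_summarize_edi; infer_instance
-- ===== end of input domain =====

-- B replaces A's frequency dict with sort-then-scan: sorted ids, one pass counting CLM/NM1 and adjacent boundaries for the unique count (alternative algorithm; return value only).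


-- ===== PORT A =====
def summarize_edi (segments : List (List (String × String))) (transaction_type : String) : String :=
  -- counts = {}; for seg in segments: counts[seg["id"]] = counts.get(seg["id"], 0) + 1
  -- seg["id"] raises KeyError when missing; Pre_ excludes that, so getD is exact there
  let counts : PySem.Dict String Int :=
    segments.foldl
      (fun d seg =>
        let k := (PySem.Dict.mk seg).getD "id" ""
        d.insert k (d.getD k 0 + 1))
      PySem.Dict.empty
  let clm_count := counts.getD "CLM" 0
  let nm1_count := counts.getD "NM1" 0
  let total : Int := segments.length
  "**Transaction Type:** " ++ transaction_type ++ "\n" ++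
  "**Total Segments:** " ++ PySem.Int.toStr total ++ "\n" ++
  "**Claim Loops (CLM):** " ++ PySem.Int.toStr clm_count ++ "\n" ++
  "**Name Segments (NM1):** " ++ PySem.Int.toStr nm1_count ++ "\n" ++
  "**Unique Segment Types:** " ++ PySem.Int.toStr counts.size

-- ===== PORT B =====
def summarize_edi_alt (segments : List (List (String × String))) (transaction_type : String) : String :=
  -- ids = sorted(seg["id"] for seg in segments)   (KeyError excluded by Pre_)
  let ids : List String :=
    PySem.List.sorted (segments.map (fun seg => (PySem.Dict.mk seg).getD "id" "")) (fun x => x) false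
  -- prev = None; unique = clm_count = nm1_count = 0; one scan over the sorted ids
  let st : Option String × Int × Int × Int :=
    ids.foldl
      (fun st x =>
        let prev := st.1
        let unique := if (some x : Option String) != prev then st.2.1 + 1 else st.2.1
        let clm_count := if x == "CLM" then st.2.2.1 + 1 else st.2.2.1
        let nm1_count := if x == "CLM" then st.2.2.2 else if x == "NM1" then st.2.2.2 + 1 else st.2.2.2
        (some x, unique, clm_count, nm1_count))
      (none, 0, 0, 0)
  "**Transaction Type:** " ++ transaction_type ++ "\n" ++
  "**Total Segments:** " ++ PySem.Int.toStr (segments.length : Int) ++ "\n" ++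
  "**Claim Loops (CLM):** " ++ PySem.Int.toStr st.2.2.1 ++ "\n" ++
  "**Name Segments (NM1):** " ++ PySem.Int.toStr st.2.2.2 ++ "\n" ++
  "**Unique Segment Types:** " ++ PySem.Int.toStr st.2.1

-- ===== PRECONDITION & SPEC =====
-- Pre_ excludes inputs where some segment lacks an "id" key: both A and B raise KeyError there.
def Pre_summarize_edi (segments : List (List (String × String))) (transaction_type : String) : Prop :=
  ∀ seg ∈ segments, (PySem.Dict.mk seg).contains "id" = true
instance (segments : List (List (String × String))) (transaction_type : String) : Decidable (Pre_summarize_edi segments transaction_type) := by unfold Pre_summarize_edi; infer_instance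
def pvWitness_summarize_edi : (List (List (String × String))) × String := ([[("id","CLM")],[("id","NM1")]], "837P")
def Spec_summarize_edi (segments : List (List (String × String))) (transaction_type : String) (out : String) : Prop := out = summarize_edi_alt segments transaction_type
instance (segments : List (List (String × String))) (transaction_type : String) (out : String) : Decidable (Spec_summarize_edi segments transaction_type out) := by unfold Spec_summarize_edi; infer_instance

-- ===== CLAIM (what is proved, stated in full; the proofs are below) =====
def Claim_equal_summarize_edi : Prop := ∀ (segments : List (List (String × String))) (transaction_type : String), Dom_summarize_edi segments transaction_type → Pre_summarize_edi segments transaction_type → Spec_summarize_edi segments transaction_type (summarize_edi segments transaction_type)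

-- ===== LEMMAS AND PROOFS =====

-- number of scan positions where the element differs from the running 'prev'
def pvRunCount (p : Option String) : List String → Nat
  | [] => 0
  | x :: xs => (if some x = p then 0 else 1) + pvRunCount (some x) xs

theorem pvFoldB_char (l : List String) (p : Option String) (u c m : Int) :
    l.foldl
      (fun (st : Option String × Int × Int × Int) x =>
        let prev := st.1
        let unique := if (some x : Option String) != prev then st.2.1 + 1 else st.2.1
        let clm_count := if x == "CLM" then st.2.2.1 + 1 else st.2.2.1
        let nm1_count := if x == "CLM" then st.2.2.2 else if x == "NM1" then st.2.2.2 + 1 else st.2.2.2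
        (some x, unique, clm_count, nm1_count))
      (p, u, c, m)
    = (l.foldl (fun _ x => some x) p,
       u + (pvRunCount p l : Int), c + (l.count "CLM" : Int), m + (l.count "NM1" : Int)) := by
  induction l generalizing p u c m with
  | nil => simp [pvRunCount]
  | cons x xs ih =>
    simp only [List.foldl_cons, ih, pvRunCount, List.count_cons]
    by_cases hp : (some x : Option String) = p <;>
      by_cases hc : x = "CLM" <;>
        by_cases hm : x = "NM1" <;>
          simp_all [bne, beq_iff_eq] <;> push_cast <;> ring_nf <;> simp

theorem pvRunCount_some (l : List String) (hs : l.Pairwise (· ≤ ·)) (x : String)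
    (hx : ∀ y ∈ l, x ≤ y) : pvRunCount (some x) l = (l.toFinset.erase x).card := by
  induction l generalizing x with
  | nil => simp [pvRunCount]
  | cons y ys ih =>
    have hys : ys.Pairwise (· ≤ ·) := hs.tail
    have hyle : ∀ z ∈ ys, y ≤ z := fun z hz => (List.pairwise_cons.mp hs).1 z hz
    rw [pvRunCount, ih hys y hyle]
    by_cases h : y = x
    · subst h; simp
    · have hxy : x ≤ y := hx y (by simp)
      have hnotin : x ∉ (y :: ys).toFinset := by
        simp only [List.toFinset_cons, Finset.mem_insert, List.mem_toFinset]
        rintro (rfl | hmem)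
        · exact h rfl
        · exact h (le_antisymm hxy (hyle x hmem)).symm
      have hnotin' : x ∉ insert y ys.toFinset := by simpa using hnotin
      rw [List.toFinset_cons, Finset.erase_eq_of_notMem hnotin']
      have hy : y ∉ ys.toFinset.erase y := Finset.notMem_erase y _
      have : insert y (ys.toFinset.erase y) = insert y ys.toFinset := by
        ext z; by_cases hz : z = y <;> simp [hz]
      rw [← this, Finset.card_insert_of_notMem hy]
      simp [h]
      omega

theorem pvRunCount_none (l : List String) (hs : l.Pairwise (· ≤ ·)) :
    pvRunCount none l = l.toFinset.card := by
  cases l with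
  | nil => simp [pvRunCount]
  | cons y ys =>
    have hys : ys.Pairwise (· ≤ ·) := hs.tail
    have hyle : ∀ z ∈ ys, y ≤ z := fun z hz => (List.pairwise_cons.mp hs).1 z hz
    rw [pvRunCount, pvRunCount_some ys hys y hyle]
    have hy : y ∉ ys.toFinset.erase y := Finset.notMem_erase y _
    have : insert y (ys.toFinset.erase y) = insert y ys.toFinset := by
      ext z; by_cases hz : z = y <;> simp [hz]
    rw [List.toFinset_cons, ← this, Finset.card_insert_of_notMem hy]
    simp
    omega

theorem pvSetLen_eq_toFinset_card (l : List String) :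
    (PySem.Set.ofList l).length = l.toFinset.card := by
  have hnd : (PySem.Set.ofList l).Nodup := PySem.Set.nodup_ofList l
  have hfs : (PySem.Set.ofList l).toFinset = l.toFinset := by
    ext z; simp [List.mem_toFinset, PySem.Set.mem_ofList]
  rw [← List.toFinset_card_of_nodup hnd, hfs]

-- ===== VERDICT (by name: the statement is the Claim_ definition above) =====
theorem summarize_edi_spec : Claim_equal_summarize_edi := by
  intro segments tt _ _
  unfold Spec_summarize_edi summarize_edi summarize_edi_alt
  set ids0 := segments.map (fun seg => (PySem.Dict.mk seg).getD "id" "") with hids0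
  set ids := PySem.List.sorted ids0 (fun x => x) false with hids
  have hperm : ids.Perm ids0 := PySem.List.sorted_perm ids0 (fun x => x) false
  have hpw : ids.Pairwise (· ≤ ·) := PySem.List.sorted_pairwise ids0 (fun x => x)
  -- A side: dict lookups = counts over ids0, size = set cardinality
  have hfold :
      segments.foldl
        (fun (d : PySem.Dict String Int) seg =>
          let k := (PySem.Dict.mk seg).getD "id" ""
          d.insert k (d.getD k 0 + 1))
        PySem.Dict.empty
      = ids0.foldl
          (fun (d : PySem.Dict String Int) k => d.insert k (d.getD k 0 + 1))
          PySem.Dict.empty := by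
    rw [hids0, List.foldl_map]
  simp only [hfold]
  rw [PySem.Dict.getD_foldl_insert_add_one, PySem.Dict.getD_foldl_insert_add_one]
  have hsize :
      (ids0.foldl
        (fun (d : PySem.Dict String Int) k => d.insert k (d.getD k 0 + 1))
        PySem.Dict.empty).size
      = ids0.toFinset.card := by
    have hkeys := PySem.Dict.keys_foldl_insert ids0
      (fun (d : PySem.Dict String Int) k => d.getD k 0 + 1) PySem.Dict.empty
    have hsz : ∀ (d : PySem.Dict String Int), d.size = d.keys.length := by
      intro d; simp [PySem.Dict.size, PySem.Dict.keys]
    rw [hsz, hkeys]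
    have : PySem.Set.update (PySem.Dict.keys (PySem.Dict.empty : PySem.Dict String Int)) ids0
        = PySem.Set.ofList ids0 := by
      simp [PySem.Set.update, PySem.Set.ofList_eq_foldl, PySem.Dict.keys_empty]
    rw [this, pvSetLen_eq_toFinset_card]
  rw [hsize]
  -- B side: the scan over the sorted ids
  rw [pvFoldB_char ids none 0 0 0]
  rw [pvRunCount_none ids hpw]
  have hfs : ids.toFinset = ids0.toFinset := List.toFinset_eq_of_perm _ _ hperm
  have hc1 : ids.count "CLM" = ids0.count "CLM" := hperm.count_eq "CLM"
  have hc2 : ids.count "NM1" = ids0.count "NM1" := hperm.count_eq "NM1"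
  rw [hfs, hc1, hc2]
  simp
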